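-- pv_equiv track=rewrite | github.com/YNemokun/Cryptography-Helper-Code | cipher programs/Frequency Analysis.py | getFrequencyVigenere
-- ===== SOURCE A (Python) =====
-- def getFrequencyVigenere(text, key_length):
--     # marks the letter of the key we are on
--     turn = 0
--     allFrequencies = []
--     while key_length > turn:
--         singleFrequency = {'A': 0, 'B': 0, 'C': 0, 'D': 0, 'E': 0, 'F': 0,
--                            'G': 0, 'H': 0, 'I': 0, 'J': 0, 'K': 0, 'L': 0, 'M': 0, 'N': 0,
--                            'O': 0, 'P': 0, 'Q': 0, 'R': 0, 'S': 0, 'T': 0, 'U': 0, 'V': 0,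
--                            'W': 0, 'X': 0, 'Y': 0, 'Z': 0}
--         # skips to every letter that is encrypted with this letter's alphabet
--         # [start:stop:step] -- [turn:end:keylength]
--         for i in text[turn::key_length]:
--             # adds one to its count
--             singleFrequency[i] += 1
--         # adds to the list of frequencies
--         allFrequencies.append(singleFrequency)
--         # goes to the next letter
--         turn += 1
--     return allFrequencies
-- ===== SOURCE B (Python) =====
-- def getFrequencyVigenere(text, key_length):
--     # one linear pass distributing each character to its key position,
--     # instead of key_length strided sub-slice passes
--     allFrequencies = [{chr(c): 0 for c in range(65, 91)} for _ in range(key_length)]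
--     if key_length > 0:
--         for idx, ch in enumerate(text):
--             allFrequencies[idx % key_length][ch] += 1
--     return allFrequencies
-- ===== Notes on version B (the rewrite author's own statement) =====
-- stated objective: idiomatic
-- what changed: Replaces A's while-loop of key_length strided slice passes (one sub-dict filled per pass) with preallocating all key_length zero-count dicts and a single enumerate pass that distributes each character to dict idx % key_length; the guard key_length > 0 keeps the empty-list behaviour for non-positive key_length without a division.
import Mathlib
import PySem

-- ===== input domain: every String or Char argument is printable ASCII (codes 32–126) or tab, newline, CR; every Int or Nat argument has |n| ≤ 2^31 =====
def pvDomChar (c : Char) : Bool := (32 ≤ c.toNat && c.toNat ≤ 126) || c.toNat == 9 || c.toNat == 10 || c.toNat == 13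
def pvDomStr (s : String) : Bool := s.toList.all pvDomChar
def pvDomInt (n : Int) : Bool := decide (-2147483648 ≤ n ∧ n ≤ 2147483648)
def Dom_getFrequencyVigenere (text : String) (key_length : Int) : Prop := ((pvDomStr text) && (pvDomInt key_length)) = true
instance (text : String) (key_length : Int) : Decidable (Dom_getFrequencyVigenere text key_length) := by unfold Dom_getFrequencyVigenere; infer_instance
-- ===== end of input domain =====

-- B replaces A's key_length strided slice passes with one linear distributing pass over
-- enumerate(text) into preallocated zero-count dicts (idiomatic decomposition; same cost).


-- ===== PORT A =====
-- the literal 26-key zero dict of A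
def pvInitFreqA : PySem.Dict String Int := PySem.Dict.ofList
  [("A",0),("B",0),("C",0),("D",0),("E",0),("F",0),("G",0),("H",0),("I",0),("J",0),("K",0),
   ("L",0),("M",0),("N",0),("O",0),("P",0),("Q",0),("R",0),("S",0),("T",0),("U",0),("V",0),
   ("W",0),("X",0),("Y",0),("Z",0)]

-- A's while-loop: one strided slice pass text[turn::key_length] per key position.
-- `singleFrequency[i] += 1` is ported as `modify … 0 (· + 1)`: on a key not already in the dict
-- Python raises KeyError — exactly those inputs are excluded by Pre_.
def pvALoop (text : List Char) (key_length : Int) (turn : Int) : List (PySem.Dict String Int) :=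
  if key_length > turn then
    ((((PySem.List.slice? text (some turn) none key_length).getD []).foldl
        (fun d c => d.modify (String.mk [c]) 0 (· + 1)) pvInitFreqA)
      :: pvALoop text key_length (turn + 1))
  else []
termination_by (key_length - turn).toNat
decreasing_by omega

def getFrequencyVigenere (text : String) (key_length : Int) : List (List (String × Int)) :=
  (pvALoop text.toList key_length 0).map PySem.Dict.items

-- ===== PORT B =====
-- B's zero dict, built by the comprehension {chr(c): 0 for c in range(65, 91)}
def pvInitFreqB : PySem.Dict String Int :=
  PySem.Dict.ofList ((PySem.List.pyRange 65 91 1).map (fun c => (String.mk [Char.ofNat c.toNat], 0)))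

-- one pass over enumerate(text), each character distributed to dict idx % key_length
def getFrequencyVigenere_alt (text : String) (key_length : Int) : List (List (String × Int)) :=
  let ds0 := (PySem.List.pyRange 0 key_length 1).map (fun _ => pvInitFreqB)
  let ds1 := if key_length > 0 then
      (PySem.List.enumerate text.toList 0).foldl
        (fun ds p => ds.modify (PySem.Int.mod p.1 key_length).toNat
          (fun d => d.modify (String.mk [p.2]) 0 (· + 1))) ds0
    else ds0
  ds1.map PySem.Dict.items

-- ===== PRECONDITION & SPEC =====
-- Pre_ excludes exactly the inputs where Python A raises KeyError: a positive key_length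
-- together with a character of text outside 'A'..'Z'.
def Pre_getFrequencyVigenere (text : String) (key_length : Int) : Prop :=
  key_length ≤ 0 ∨ (text.toList.all (fun c => 65 ≤ c.toNat && c.toNat ≤ 90)) = true
instance (text : String) (key_length : Int) : Decidable (Pre_getFrequencyVigenere text key_length) := by
  unfold Pre_getFrequencyVigenere; infer_instance

def pvWitness_getFrequencyVigenere : String × Int := ("HELLOWORLD", 3)

def Spec_getFrequencyVigenere (text : String) (key_length : Int) (out : List (List (String × Int))) : Prop := out = getFrequencyVigenere_alt text key_length
instance (text : String) (key_length : Int) (out : List (List (String × Int))) : Decidable (Spec_getFrequencyVigenere text key_length out) := by unfold Spec_getFrequencyVigenere; infer_instance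

-- ===== CLAIM (what is proved, stated in full; the proofs are below) =====
def Claim_equal_getFrequencyVigenere : Prop := ∀ (text : String) (key_length : Int), Dom_getFrequencyVigenere text key_length → Pre_getFrequencyVigenere text key_length → Spec_getFrequencyVigenere text key_length (getFrequencyVigenere text key_length)

-- ===== LEMMAS AND PROOFS =====

-- A's strided slice text[j::k], as a plain list
def pvSliceL (k : Nat) (cs : List Char) (j : Nat) : List Char :=
  (PySem.List.slice? cs (some (j : Int)) none (k : Int)).getD []

-- the characters of cs at positions p (counted from s) with p % k = j
def pvStride (k j : Nat) : List Char → Nat → List Char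
  | [], _ => []
  | c :: cs, s => if s % k = j then c :: pvStride k j cs (s + 1) else pvStride k j cs (s + 1)

lemma pvInitFreqB_eq : pvInitFreqB = pvInitFreqA := by decide

lemma pvStride_mod (k j : Nat) (cs : List Char) : ∀ s t, s % k = t % k →
    pvStride k j cs s = pvStride k j cs t := by
  induction cs with
  | nil => intro s t _; rfl
  | cons c cs ih =>
    intro s t h
    have h1 : (s + 1) % k = (t + 1) % k := by rw [Nat.add_mod s 1, Nat.add_mod t 1, h]
    simp only [pvStride, h]
    rw [ih _ _ h1]

lemma pvStride_skip (k j : Nat) : ∀ (m : Nat) (cs : List Char) (s : Nat),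
    (∀ i, i < m → (s + i) % k ≠ j) →
    pvStride k j cs s = pvStride k j (cs.drop m) (s + m) := by
  intro m
  induction m with
  | zero => intro cs s _; simp
  | succ m ih =>
    intro cs s h
    cases cs with
    | nil => simp [pvStride]
    | cons c cs =>
      have h0 : s % k ≠ j := by have := h 0 (by omega); simpa using this
      simp only [pvStride, h0, if_false, List.drop_succ_cons]
      rw [ih cs (s + 1) (fun i hi => by
        have := h (i + 1) (by omega)
        have e : s + (i + 1) = s + 1 + i := by omega
        rwa [e] at this)]
      congr 1
      omega

lemma pvStride_chunk (k j : Nat) (hj : j < k) (cs : List Char) :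
    pvStride k j cs 0 = if h : j < cs.length then cs[j] :: pvStride k j (cs.drop k) 0 else [] := by
  have hskip : pvStride k j cs 0 = pvStride k j (cs.drop j) j := by
    have h := pvStride_skip k j j cs 0 (fun i hi => by
      rw [Nat.zero_add, Nat.mod_eq_of_lt (by omega)]; omega)
    simpa using h
  by_cases h : j < cs.length
  · rw [dif_pos h, hskip, List.drop_eq_getElem_cons h]
    simp only [pvStride, Nat.mod_eq_of_lt hj]
    rw [pvStride_skip k j (k - (j + 1)) (cs.drop (j + 1)) (j + 1) (fun i hi => by
      rw [Nat.mod_eq_of_lt (by omega)]; omega)]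
    rw [List.drop_drop]
    have e1 : j + 1 + (k - (j + 1)) = k := by omega
    rw [e1]
    simp only [if_true]
    congr 1
    exact pvStride_mod k j _ k 0 (by simp [Nat.mod_self])
  · rw [dif_neg h, hskip, List.drop_eq_nil_of_le (by omega)]
    rfl

lemma pvSliceL_core (k : Nat) (hk : 0 < k) (cs : List Char) (j : Nat) :
    pvSliceL k cs j =
      (List.range ((cs.length - j + k - 1) / k)).map (fun m => cs.getD (j + k * m) 'A') := by
  unfold pvSliceL
  simp only [PySem.List.slice?, PySem.List.sliceIndices]
  have hk0 : ¬ ((k:Int) = 0) := by omega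
  have hkneg : ¬ ((k:Int) < 0) := by omega
  have hjneg : ¬ ((j:Int) < 0) := by omega
  have hkpos : (0:Int) < (k:Int) := by omega
  simp only [hk0, hkneg, hjneg, if_false, hkpos, if_true, Option.getD_some]
  by_cases hj : j < cs.length
  · have hmin : min (j:Int) (cs.length:Int) = (j:Int) := by omega
    have hlt : min (j:Int) (cs.length:Int) < (cs.length:Int) := by omega
    rw [hmin] at hlt ⊢
    simp only [hlt, if_true]
    have hcnt : (((cs.length:Int) - (j:Int) + (k:Int) - 1) / (k:Int)).toNat
        = (cs.length - j + k - 1) / k := by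
      have e : ((cs.length:Int) - (j:Int) + (k:Int) - 1) = ((cs.length - j + k - 1 : Nat) : Int) := by
        omega
      rw [e, ← Int.natCast_div, Int.toNat_natCast]
    rw [hcnt]
    apply List.filterMap_eq_map_iff_forall_eq_some.mpr
    intro x hx
    rw [List.mem_range] at hx
    have hidx : j + k * x < cs.length := by
      have h1 : k * (x + 1) ≤ k * ((cs.length - j + k - 1) / k) :=
        Nat.mul_le_mul_left _ (by omega)
      have e2 : k * (x + 1) = k * x + k := by ring
      have hd := Nat.div_add_mod (cs.length - j + k - 1) k
      have hm := Nat.mod_lt (cs.length - j + k - 1) hk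
      omega
    have e : ((j:Int) + (k:Int) * (x:Int)).toNat = j + k * x := by
      omega
    rw [e, List.getElem?_eq_getElem hidx, List.getD_eq_getElem cs 'A' hidx]
  · have hmin : min (j:Int) (cs.length:Int) = (cs.length:Int) := by omega
    have hlt : ¬ (min (j:Int) (cs.length:Int) < (cs.length:Int)) := by omega
    simp only [hlt, if_false]
    have : (cs.length - j + k - 1) / k = 0 := by
      apply Nat.div_eq_of_lt; omega
    rw [this]
    simp

lemma pvSliceL_chunk (k : Nat) (hk : 0 < k) (cs : List Char) (j : Nat) :
    pvSliceL k cs j = if h : j < cs.length then cs[j] :: pvSliceL k (cs.drop k) j else [] := by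
  rw [pvSliceL_core k hk, pvSliceL_core k hk]
  by_cases hj : j < cs.length
  · rw [dif_pos hj]
    have hcnt : (cs.length - j + k - 1) / k = (cs.length - j - 1) / k + 1 := by
      have e : cs.length - j + k - 1 = (cs.length - j - 1) + k := by omega
      rw [e, Nat.add_div_right _ hk]
    have hcnt' : ((cs.drop k).length - j + k - 1) / k = (cs.length - j - 1) / k := by
      rw [List.length_drop]
      by_cases hnk : j < cs.length - k
      · congr 1; omega
      · have h1 : cs.length - k - j + k - 1 < k := by omega
        have h2 : cs.length - j - 1 < k := by omega
        rw [Nat.div_eq_of_lt h1, Nat.div_eq_of_lt h2]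
    rw [hcnt, hcnt', List.range_succ_eq_map]
    simp only [List.map_cons, List.map_map]
    congr 1
    · rw [Nat.mul_zero, Nat.add_zero, List.getD_eq_getElem cs 'A' hj]
    · apply List.map_congr_left
      intro m _
      simp only [Function.comp]
      rw [List.getD, List.getD, List.getElem?_drop]
      congr 2
      simp only [Nat.succ_eq_add_one]
      ring
  · rw [dif_neg hj]
    have h1 : (cs.length - j + k - 1) / k = 0 := by apply Nat.div_eq_of_lt; omega
    rw [h1]; simp

lemma pvSliceL_eq_stride (k : Nat) (hk : 0 < k) (j : Nat) (hj : j < k) (cs : List Char) :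
    pvSliceL k cs j = pvStride k j cs 0 := by
  have H : ∀ n (cs : List Char), cs.length ≤ n → pvSliceL k cs j = pvStride k j cs 0 := by
    intro n
    induction n with
    | zero =>
      intro cs hlen
      have : cs = [] := List.eq_nil_of_length_eq_zero (by omega)
      subst this
      rw [pvSliceL_chunk k hk, pvStride_chunk k j hj]
      simp
    | succ n ih =>
      intro cs hlen
      rw [pvSliceL_chunk k hk, pvStride_chunk k j hj]
      by_cases h : j < cs.length
      · simp only [h, dif_pos]
        congr 1
        exact ih _ (by have := List.length_drop (l := cs) (i := k); omega)
      · simp [h]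
  exact H cs.length cs le_rfl

-- the distributing fold of B, slot by slot
lemma pvDistrib (k : Nat) (j : Nat) :
    ∀ (cs : List Char) (s : Nat) (ds : List (PySem.Dict String Int)),
    ((PySem.List.enumerate cs (s : Int)).foldl
        (fun ds p => ds.modify (PySem.Int.mod p.1 (k : Int)).toNat
          (fun d => d.modify (String.mk [p.2]) 0 (· + 1))) ds)[j]?
      = (ds[j]?).map (fun d =>
          (pvStride k j cs s).foldl (fun d c => d.modify (String.mk [c]) 0 (· + 1)) d) := by
  intro cs
  induction cs with
  | nil =>
    intro s ds
    simp only [PySem.List.enumerate, List.foldl_nil, pvStride]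
    cases ds[j]? <;> simp
  | cons c cs ih =>
    intro s ds
    rw [PySem.List.enumerate_cons]
    have hcast : ((s : Int)) + 1 = ((s + 1 : Nat) : Int) := by push_cast; ring
    simp only [List.foldl_cons, hcast]
    rw [ih (s + 1)]
    have hmod : (PySem.Int.mod (s : Int) (k : Int)).toNat = s % k := by
      rw [PySem.Int.mod_natCast, Int.toNat_natCast]
    rw [List.getElem?_modify, hmod]
    simp only [pvStride]
    by_cases hsj : s % k = j
    · simp only [hsj, if_true]
      cases ds[j]? <;> simp
    · simp only [hsj, if_false]
      cases ds[j]? <;> simp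

-- A's while loop as a map over the remaining turns
lemma pvALoop_eq (cs : List Char) (k : Nat) :
    ∀ n t, k - t = n → t ≤ k →
    pvALoop cs (k : Int) (t : Int) =
      (List.range n).map (fun m =>
        (pvSliceL k cs (t + m)).foldl (fun d c => d.modify (String.mk [c]) 0 (· + 1)) pvInitFreqA) := by
  intro n
  induction n with
  | zero =>
    intro t ht _
    rw [pvALoop]
    have : ¬ ((k : Int) > (t : Int)) := by omega
    simp [this]
  | succ n ih =>
    intro t ht _
    rw [pvALoop]
    have hlt : (k : Int) > (t : Int) := by omega
    simp only [hlt, if_pos]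
    have hcast : ((t : Int)) + 1 = ((t + 1 : Nat) : Int) := by push_cast; ring
    rw [hcast, ih (t + 1) (by omega) (by omega)]
    rw [List.range_succ_eq_map]
    simp only [List.map_cons, List.map_map]
    congr 1
    apply List.map_congr_left
    intro m _
    simp only [Function.comp]
    congr 2
    omega

-- ===== VERDICT (by name: the statement is the Claim_ definition above) =====
theorem getFrequencyVigenere_spec : Claim_equal_getFrequencyVigenere := by
  intro text key_length _ _
  unfold Spec_getFrequencyVigenere getFrequencyVigenere getFrequencyVigenere_alt
  by_cases hk : key_length > 0
  · set K := key_length.toNat with hK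
    have hkey : key_length = (K : Int) := by omega
    have hKpos : 0 < K := by omega
    simp only [hkey]
    rw [if_pos (show ((K:Int)) > 0 by omega)]
    congr 1
    apply List.ext_getElem?
    intro j
    have hA := pvALoop_eq text.toList K K 0 (by omega) (by omega)
    rw [Nat.cast_zero] at hA
    have hB := pvDistrib K j text.toList 0 ((PySem.List.pyRange 0 (K:Int) 1).map (fun _ => pvInitFreqB))
    rw [Nat.cast_zero] at hB
    rw [hA, hB]
    have hds0 : ((PySem.List.pyRange 0 (K : Int) 1).map (fun _ => pvInitFreqB))[j]?
        = if j < K then some pvInitFreqA else none := by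
      rw [PySem.List.pyRange_zero_natCast, List.map_map, List.getElem?_map]
      by_cases hj : j < K
      · rw [List.getElem?_range hj]
        simp [hj, pvInitFreqB_eq]
      · rw [List.getElem?_eq_none (by simpa using Nat.le_of_not_lt hj)]
        simp [hj]
    rw [hds0, List.getElem?_map]
    by_cases hj : j < K
    · rw [List.getElem?_range hj]
      simp only [hj, if_true, Option.map_some]
      congr 2
      rw [Nat.zero_add]
      exact pvSliceL_eq_stride K hKpos j hj text.toList
    · rw [List.getElem?_eq_none (by simpa using Nat.le_of_not_lt hj)]
      simp [hj]
  · have h1 : ¬ ((key_length : Int) > (0 : Int)) := hk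
    rw [pvALoop]
    have h2 : PySem.List.pyRange 0 key_length 1 = [] := by
      simp only [PySem.List.pyRange]
      have : ¬ ((1:Int) = 0) := by omega
      simp only [this, if_false]
      have hlt : ¬ ((0:Int) < key_length) := by omega
      norm_num [hlt]
    simp [h1, h2]
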